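-- pv_equiv track=rewrite | github.com/MontelioneLab/CSP_UBQ | scripts/uniprot_io.py | _parse_uniprot_fasta_body
-- ===== SOURCE A (Python) =====
-- _VALID_AA = frozenset("ACDEFGHIKLMNPQRSTVWYUXOBZ")
--
-- def _parse_uniprot_fasta_body(text: str) -> str:
--     """Join all sequence lines after the first FASTA header (UniProt uses fixed-width lines)."""
--     lines = [ln.strip() for ln in text.splitlines() if ln.strip()]
--     if not lines:
--         return ""
--     i = 0
--     if lines[0].startswith(">"):
--         i = 1
--     chunks: list[str] = []
--     for ln in lines[i:]:
--         if ln.startswith(">"):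
--             break
--         chunks.append(ln)
--     raw = "".join(chunks).replace("*", "").upper()
--     return "".join(a for a in raw if a in _VALID_AA)
-- ===== SOURCE B (Python) =====
-- _VALID_AA = frozenset("ACDEFGHIKLMNPQRSTVWYUXOBZ")
--
-- def _parse_uniprot_fasta_body(text: str) -> str:
--     """Single fused streaming pass: no intermediate line list, chunk list or raw string."""
--     out = []
--     seen = False
--     for raw_ln in text.splitlines():
--         ln = raw_ln.strip()
--         if not ln:
--             continue
--         if ln.startswith(">"):
--             if seen:
--                 break
--             seen = True
--             continue
--         seen = True
--         for ch in ln: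
--             u = ch.upper()
--             if u in _VALID_AA:
--                 out.append(u)
--     return "".join(out)
-- ===== Notes on version B (the rewrite author's own statement) =====
-- stated objective: alternative
-- what changed: Replaced A's four-stage pipeline (strip/filter list, header skip, chunk list, join+replace+upper+filter string passes) by one fused streaming pass over splitlines with a seen-first flag, filtering/uppercasing characters as lines arrive with no intermediate lists or strings.
import Mathlib
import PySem

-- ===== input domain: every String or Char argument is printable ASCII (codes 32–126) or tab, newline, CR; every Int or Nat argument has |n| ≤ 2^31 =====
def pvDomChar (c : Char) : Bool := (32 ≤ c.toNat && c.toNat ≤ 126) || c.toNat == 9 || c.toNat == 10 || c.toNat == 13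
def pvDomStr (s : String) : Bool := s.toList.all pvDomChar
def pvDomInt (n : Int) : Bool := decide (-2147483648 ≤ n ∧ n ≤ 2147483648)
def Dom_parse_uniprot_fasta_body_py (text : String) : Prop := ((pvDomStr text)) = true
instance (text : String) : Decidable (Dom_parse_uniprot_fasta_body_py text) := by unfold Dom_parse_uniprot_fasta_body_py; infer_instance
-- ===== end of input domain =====

-- B fuses A's multi-stage pipeline (line list, chunk list, joined string, three string passes)
-- into one streaming pass over splitlines with a seen-first flag; same cost, different decomposition.

-- ===== PORT A =====
def pvValidAA : PySem.Set Char := PySem.Set.ofList "ACDEFGHIKLMNPQRSTVWYUXOBZ".toList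

-- the `for ln in lines[i:]: if ln.startswith(">"): break; chunks.append(ln)` loop
def pvChunksA : List String → List String
  | [] => []
  | ln :: rest => if PySem.Str.startswith ln ">" then [] else ln :: pvChunksA rest

-- A's body after `lines` has been computed
def pvBodyA (lines : List String) : String :=
  match lines with
  | [] => ""
  | first :: restAll =>
    let body := if PySem.Str.startswith first ">" then restAll else first :: restAll
    let chunks := pvChunksA body
    let raw := PySem.Str.upper (PySem.Str.replace (PySem.Str.join "" chunks) "*" "")
    String.ofList (raw.toList.filter (fun a => PySem.Set.contains pvValidAA a))

def parse_uniprot_fasta_body_py (text : String) : String :=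
  pvBodyA (((PySem.Str.splitlines text).map PySem.Str.strip).filter (fun ln => !(ln == "")))

-- ===== PORT B =====
-- the inner `for ch in ln:` loop of Source B
def pvLineChars : List Char → List Char
  | [] => []
  | c :: rest =>
    let u := PySem.Chars.upperChar c
    if PySem.Set.contains pvValidAA u then u :: pvLineChars rest else pvLineChars rest

-- the outer `for raw_ln in text.splitlines():` loop of Source B, with the `seen` flag
def pvBLoop : List String → Bool → List Char
  | [], _ => []
  | rawLn :: rest, seen =>
    let ln := PySem.Str.strip rawLn
    if ln == "" then pvBLoop rest seen
    else if PySem.Str.startswith ln ">" then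
      (if seen then [] else pvBLoop rest true)
    else pvLineChars ln.toList ++ pvBLoop rest true

def parse_uniprot_fasta_body_py_alt (text : String) : String :=
  String.ofList (pvBLoop (PySem.Str.splitlines text) false)

-- ===== PRECONDITION & SPEC =====
def Spec_parse_uniprot_fasta_body_py (text : String) (out : String) : Prop := out = parse_uniprot_fasta_body_py_alt text
instance (text : String) (out : String) : Decidable (Spec_parse_uniprot_fasta_body_py text out) := by unfold Spec_parse_uniprot_fasta_body_py; infer_instance

-- ===== CLAIM (what is proved, stated in full; the proofs are below) =====
def Claim_equal_parse_uniprot_fasta_body_py : Prop := ∀ (text : String), Dom_parse_uniprot_fasta_body_py text → Spec_parse_uniprot_fasta_body_py text (parse_uniprot_fasta_body_py text)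

-- ===== LEMMAS AND PROOFS =====

-- B's loop restricted to the stripped, non-empty lines (what A calls `lines`).
def pvBLoop' : List String → Bool → List Char
  | [], _ => []
  | ln :: rest, seen =>
    if PySem.Str.startswith ln ">" then
      (if seen then [] else pvBLoop' rest true)
    else pvLineChars ln.toList ++ pvBLoop' rest true

theorem pvBLoop_cons (r : String) (rest : List String) (seen : Bool) :
    pvBLoop (r :: rest) seen =
      if PySem.Str.strip r == "" then pvBLoop rest seen
      else if PySem.Str.startswith (PySem.Str.strip r) ">" then
        (if seen then [] else pvBLoop rest true)
      else pvLineChars (PySem.Str.strip r).toList ++ pvBLoop rest true := rfl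

theorem pvBLoop'_cons (ln : String) (rest : List String) (seen : Bool) :
    pvBLoop' (ln :: rest) seen =
      if PySem.Str.startswith ln ">" then (if seen then [] else pvBLoop' rest true)
      else pvLineChars ln.toList ++ pvBLoop' rest true := rfl

theorem pvChunksA_cons (ln : String) (rest : List String) :
    pvChunksA (ln :: rest) = if PySem.Str.startswith ln ">" then [] else ln :: pvChunksA rest := rfl

theorem pvLineChars_cons (c : Char) (t : List Char) :
    pvLineChars (c :: t) =
      if PySem.Set.contains pvValidAA (PySem.Chars.upperChar c)
      then PySem.Chars.upperChar c :: pvLineChars t else pvLineChars t := rfl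

theorem pvBLoop_eq_filtered (L : List String) (seen : Bool) :
    pvBLoop L seen = pvBLoop' ((L.map PySem.Str.strip).filter (fun ln => !(ln == ""))) seen := by
  induction L generalizing seen with
  | nil => rfl
  | cons r rest ih =>
    rw [pvBLoop_cons, List.map_cons]
    by_cases h : (PySem.Str.strip r == "") = true
    · rw [if_pos h, List.filter_cons_of_neg (by simp [h]), ih]
    · have hb : ¬ ((fun ln => !(ln == "")) (PySem.Str.strip r) = false) := by
        simp only [Bool.not_eq_false', Bool.not_eq_true]
        simpa using h
      rw [if_neg h, List.filter_cons_of_pos (by simpa using hb), pvBLoop'_cons]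
      by_cases hs : PySem.Str.startswith (PySem.Str.strip r) ">" = true
      · rw [if_pos hs, if_pos hs]
        cases seen with
        | true => rfl
        | false =>
          rw [if_neg (by simp), if_neg (by simp), ih]
      · rw [if_neg hs, if_neg hs, ih]

theorem pvReplace_go_star (fuel : Nat) (l acc : List Char) (h : l.length ≤ fuel) :
    PySem.Chars.replace.go ['*'] [] fuel l acc
      = acc.reverse ++ l.filter (fun c => !(c == '*')) := by
  induction fuel generalizing l acc with
  | zero =>
    have : l = [] := by cases l <;> simp_all
    subst this
    rw [PySem.Chars.replace.go.eq_def]; simp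
  | succ n ih =>
    cases l with
    | nil => rw [PySem.Chars.replace.go.eq_def]; simp
    | cons c t =>
      rw [PySem.Chars.replace.go.eq_def]
      by_cases hc : c = '*'
      · subst hc
        have hp : ['*'].isPrefixOf ('*' :: t) = true := by simp [List.isPrefixOf]
        simp only [hp, if_true, List.reverse_nil, List.nil_append]
        rw [show List.drop (['*'].length) ('*' :: t) = t from rfl,
          ih t acc (by simpa using Nat.le_of_succ_le_succ h)]
        simp
      · have hp : (['*'].isPrefixOf (c :: t)) = false := by
          simp only [List.isPrefixOf, Bool.and_eq_false_iff, beq_eq_false_iff_ne, ne_eq]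
          exact Or.inl fun hcc => hc hcc.symm
        simp only [hp, Bool.false_eq_true, if_false]
        rw [ih t (c :: acc) (by simpa using Nat.le_of_succ_le_succ h)]
        simp [hc]

theorem pvReplace_star (cs : List Char) :
    PySem.Chars.replace cs ['*'] [] = cs.filter (fun c => !(c == '*')) := by
  have := pvReplace_go_star cs.length cs [] (le_refl _)
  simpa [PySem.Chars.replace] using this

theorem pvLineChars_eq_aux (cs : List Char) :
    List.filter (fun a => PySem.Set.contains pvValidAA a)
        (List.map PySem.Chars.upperChar (List.filter (fun c => !(c == '*')) cs))
      = pvLineChars cs := by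
  induction cs with
  | nil => rfl
  | cons c t ih =>
    by_cases hc : c = '*'
    · subst hc
      rw [List.filter_cons_of_neg (by decide), pvLineChars_cons, if_neg (by decide), ih]
    · rw [List.filter_cons_of_pos (by simp [hc]), List.map_cons, pvLineChars_cons]
      cases hm : PySem.Set.contains pvValidAA (PySem.Chars.upperChar c) with
      | true => rw [List.filter_cons_of_pos hm, if_pos rfl, ih]
      | false => rw [List.filter_cons_of_neg (by rw [hm]; exact Bool.false_ne_true), if_neg (by simp), ih]

theorem pvLineChars_eq (cs : List Char) :
    (PySem.Chars.upper (PySem.Chars.replace cs ['*'] [])).filter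
        (fun a => PySem.Set.contains pvValidAA a) = pvLineChars cs := by
  rw [pvReplace_star]
  simp only [PySem.Chars.upper]
  exact pvLineChars_eq_aux cs

theorem pvLineChars_append (as bs : List Char) :
    pvLineChars (as ++ bs) = pvLineChars as ++ pvLineChars bs := by
  induction as with
  | nil => rfl
  | cons c t ih =>
    rw [List.cons_append, pvLineChars_cons, pvLineChars_cons, ih]
    split <;> rfl

theorem pvJoin_nil_cons (x : List Char) (xs : List (List Char)) :
    PySem.Chars.join [] (x :: xs) = x ++ PySem.Chars.join [] xs := by
  cases xs with
  | nil => simp [PySem.Chars.join, List.intercalate]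
  | cons y ys => simp [PySem.Chars.join, List.intercalate]

theorem pvBLoop'_true (lines : List String) :
    pvBLoop' lines true
      = pvLineChars (PySem.Chars.join [] ((pvChunksA lines).map String.toList)) := by
  induction lines with
  | nil => rfl
  | cons ln rest ih =>
    rw [pvBLoop'_cons, pvChunksA_cons]
    by_cases h : PySem.Str.startswith ln ">" = true
    · rw [if_pos h, if_pos h, if_pos rfl]
      rfl
    · rw [if_neg h, if_neg h, List.map_cons, pvJoin_nil_cons, pvLineChars_append, ih]

theorem pvChunkChars (chunks : List String) :
    ((PySem.Str.upper (PySem.Str.replace (PySem.Str.join "" chunks) "*" "")).toList).filter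
        (fun a => PySem.Set.contains pvValidAA a)
      = pvLineChars (PySem.Chars.join [] (chunks.map String.toList)) := by
  rw [PySem.Str.toList_upper, PySem.Str.toList_replace, PySem.Str.toList_join,
    show ("".toList) = ([] : List Char) from rfl, show ("*".toList) = ['*'] from rfl,
    pvLineChars_eq]

theorem pvBodyA_eq (lines : List String) :
    pvBodyA lines = String.ofList (pvBLoop' lines false) := by
  cases lines with
  | nil => rfl
  | cons first restAll =>
    show String.ofList
        ((PySem.Str.upper (PySem.Str.replace (PySem.Str.join ""
            (pvChunksA (if PySem.Str.startswith first ">" then restAll else first :: restAll)))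
            "*" "")).toList.filter (fun a => PySem.Set.contains pvValidAA a))
        = String.ofList (pvBLoop' (first :: restAll) false)
    rw [pvBLoop'_cons]
    by_cases h : PySem.Str.startswith first ">" = true
    · rw [if_pos h, if_pos h, if_neg (by simp), pvChunkChars, pvBLoop'_true]
    · rw [if_neg h, if_neg h, pvChunkChars, pvBLoop'_true, pvChunksA_cons, if_neg h,
        List.map_cons, pvJoin_nil_cons, pvLineChars_append]

-- ===== VERDICT (by name: the statement is the Claim_ definition above) =====
theorem parse_uniprot_fasta_body_py_spec : Claim_equal_parse_uniprot_fasta_body_py := by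
  intro text _
  unfold Spec_parse_uniprot_fasta_body_py parse_uniprot_fasta_body_py parse_uniprot_fasta_body_py_alt
  rw [pvBLoop_eq_filtered, pvBodyA_eq]
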